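-- pv_equiv track=rewrite | github.com/ProjectInitiative/SourceAssist | sa/versioning.py | update_version
-- ===== SOURCE A (Python) =====
-- def update_version(prev_ver_num):
--     version_num = prev_ver_num.split('.')
--     build_num = int(version_num[-1])
--     build_num += 1
--
--     new_version_num = ''
--     for num in version_num[:-1]:
--         new_version_num = ''.join([new_version_num, str(num), '.'])
--
--     new_version_num = ''.join([new_version_num, str(build_num)])
--     return new_version_num
-- ===== SOURCE B (Python) =====
-- def update_version(prev_ver_num):
--     head, sep, tail = prev_ver_num.rpartition('.')
--     build = int(tail) + 1
--     return head + sep + str(build)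
-- ===== Notes on version B (the rewrite author's own statement) =====
-- stated objective: simpler
-- what changed: Replaces split-into-all-segments plus a rebuild loop over the prefix segments with a single right-anchored rpartition: the whole prefix is kept as one untouched string and only the last field is parsed, incremented and re-appended.
import Mathlib
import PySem

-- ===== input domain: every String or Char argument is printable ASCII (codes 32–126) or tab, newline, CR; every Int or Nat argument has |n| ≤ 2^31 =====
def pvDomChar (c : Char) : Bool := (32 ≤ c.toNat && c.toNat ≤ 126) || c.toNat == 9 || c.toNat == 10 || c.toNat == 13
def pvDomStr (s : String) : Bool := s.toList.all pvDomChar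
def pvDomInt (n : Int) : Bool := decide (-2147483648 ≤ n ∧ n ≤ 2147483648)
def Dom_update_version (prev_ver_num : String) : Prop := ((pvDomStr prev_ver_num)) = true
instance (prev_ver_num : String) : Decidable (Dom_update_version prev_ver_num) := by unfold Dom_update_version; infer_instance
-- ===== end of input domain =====

-- B replaces A's split-all-segments-and-rebuild loop with a single right-anchored
-- rpartition('.') that keeps the whole prefix untouched (objective: simpler).


-- ===== PORT A =====
def update_version (prev_ver_num : String) : String :=
  let version_num : List String := (PySem.Str.split? prev_ver_num ".").getD []
  match PySem.Int.ofStr? (PySem.List.pyGetD version_num (-1) "") with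
  | none => ""   -- int() raises ValueError here; these inputs are excluded by Pre_
  | some b0 =>
    let build_num := b0 + 1
    let new_version_num :=
      (PySem.List.slice version_num none (some (-1))).foldl
        (fun acc num => PySem.Str.join "" [acc, num, "."]) ""
    PySem.Str.join "" [new_version_num, PySem.Int.toStr build_num]

-- ===== PORT B =====
-- hand port of str.rpartition('.') for the single-character separator '.':
-- returns (head, sep, tail) split at the LAST '.'; (("","",s)) when '.' is absent — exact
def rpartitionDot (cs : List Char) : List Char × List Char × List Char :=
  match cs with
  | [] => ([], [], [])
  | c :: rest =>
    let p := rpartitionDot rest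
    if p.2.1 = [] then
      if c = '.' then ([], ['.'], rest) else ([], [], c :: p.2.2)
    else (c :: p.1, p.2.1, p.2.2)

def update_version_alt (prev_ver_num : String) : String :=
  let p := rpartitionDot prev_ver_num.toList
  match PySem.Int.ofChars? p.2.2 with
  | none => ""   -- int() raises ValueError here; these inputs are excluded by Pre_
  | some n => String.ofList (p.1 ++ p.2.1 ++ PySem.Int.toChars (n + 1))

-- ===== PRECONDITION & SPEC =====
-- Pre_: the last '.'-separated field of the string parses as a Python int
-- (exactly where A's int(version_num[-1]) does not raise ValueError).
def Pre_update_version (prev_ver_num : String) : Prop :=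
  (PySem.Int.ofChars?
    ((PySem.Chars.splitOn prev_ver_num.toList ['.']).getLast?.getD [])).isSome = true
instance (prev_ver_num : String) : Decidable (Pre_update_version prev_ver_num) := by
  unfold Pre_update_version; infer_instance

def pvWitness_update_version : String := "1.2.3"

def Spec_update_version (prev_ver_num : String) (out : String) : Prop := out = update_version_alt prev_ver_num
instance (prev_ver_num : String) (out : String) : Decidable (Spec_update_version prev_ver_num out) := by unfold Spec_update_version; infer_instance

-- ===== CLAIM (what is proved, stated in full; the proofs are below) =====
def Claim_equal_update_version : Prop := ∀ (prev_ver_num : String), Dom_update_version prev_ver_num → Pre_update_version prev_ver_num → Spec_update_version prev_ver_num (update_version prev_ver_num)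

-- ===== LEMMAS AND PROOFS =====

-- reference structural splitter: mySplit pre cs = the '.'-chunks of (pre ++ cs),
-- with pre the partial chunk accumulated so far
def mySplit (pre : List Char) (cs : List Char) : List (List Char) :=
  match cs with
  | [] => [pre]
  | c :: rest => if c = '.' then pre :: mySplit [] rest else mySplit (pre ++ [c]) rest

theorem splitOn_go_eq (fuel : Nat) :
    ∀ (l cur : List Char) (accs : List (List Char)), l.length < fuel →
      PySem.Chars.splitOn.go ['.'] fuel l cur accs = accs.reverse ++ mySplit cur.reverse l := by
  induction fuel with
  | zero => intro l cur accs h; omega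
  | succ n ih =>
    intro l cur accs h
    match l with
    | [] => simp [PySem.Chars.splitOn.go, mySplit]
    | c :: rest =>
      by_cases hc : c = '.'
      · subst hc
        rw [show PySem.Chars.splitOn.go ['.'] (n+1) ('.' :: rest) cur accs
              = PySem.Chars.splitOn.go ['.'] n rest [] (cur.reverse :: accs) by
            simp [PySem.Chars.splitOn.go, List.isPrefixOf]]
        rw [ih rest [] (cur.reverse :: accs) (by simpa using Nat.lt_of_succ_lt_succ h)]
        simp [mySplit]
      · rw [show PySem.Chars.splitOn.go ['.'] (n+1) (c :: rest) cur accs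
              = PySem.Chars.splitOn.go ['.'] n rest (c :: cur) accs by
            simp [PySem.Chars.splitOn.go, List.isPrefixOf, Ne.symm hc]]
        rw [ih rest (c :: cur) accs (by simpa using Nat.lt_of_succ_lt_succ h)]
        simp [mySplit, hc]

theorem splitOn_eq_mySplit (cs : List Char) :
    PySem.Chars.splitOn cs ['.'] = mySplit [] cs := by
  have := splitOn_go_eq (cs.length + 1) cs [] [] (by omega)
  simpa [PySem.Chars.splitOn] using this

theorem mySplit_no_dot (cs : List Char) (h : '.' ∉ cs) :
    ∀ pre, mySplit pre cs = [pre ++ cs] := by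
  induction cs with
  | nil => intro pre; simp [mySplit]
  | cons c rest ih =>
    intro pre
    have hc : c ≠ '.' := fun hh => h (hh ▸ List.mem_cons_self)
    simp [mySplit, hc, ih (fun hm => h (List.mem_cons_of_mem _ hm))]

theorem mySplit_append_dot (x y : List Char) :
    ∀ pre, mySplit pre (x ++ '.' :: y) = mySplit pre x ++ mySplit [] y := by
  induction x with
  | nil => intro pre; simp [mySplit]
  | cons c rest ih =>
    intro pre
    by_cases hc : c = '.'
    · subst hc; simp [mySplit, ih]
    · simp [mySplit, hc, ih]

theorem mySplit_flatMap_dot (cs : List Char) :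
    ∀ pre, (mySplit pre cs).flatMap (fun p => p ++ ['.']) = pre ++ cs ++ ['.'] := by
  induction cs with
  | nil => intro pre; simp [mySplit]
  | cons c rest ih =>
    intro pre
    by_cases hc : c = '.'
    · subst hc; simp [mySplit, ih]
    · simp [mySplit, hc, ih]

-- rpartitionDot is either "no dot anywhere" or splits at the last dot
theorem rpartitionDot_spec (cs : List Char) :
    (rpartitionDot cs = ([], [], cs) ∧ '.' ∉ cs) ∨
    (∃ h t, rpartitionDot cs = (h, ['.'], t) ∧ cs = h ++ '.' :: t ∧ '.' ∉ t) := by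
  induction cs with
  | nil => left; simp [rpartitionDot]
  | cons c rest ih =>
    rcases ih with ⟨heq, hnd⟩ | ⟨h, t, heq, hcs, hnd⟩
    · by_cases hc : c = '.'
      · right; exact ⟨[], rest, by simp [rpartitionDot, heq, hc], by simp [hc], hnd⟩
      · left
        constructor
        · simp [rpartitionDot, heq, hc]
        · simp [hnd, Ne.symm hc]
    · right
      refine ⟨c :: h, t, ?_, by simp [hcs], hnd⟩
      simp [rpartitionDot, heq]

-- A's rebuilding fold, pushed down to character lists
theorem foldA_eq (ps : List (List Char)) :
    ∀ acc : String,
      ((ps.map String.ofList).foldl (fun acc num => PySem.Str.join "" [acc, num, "."]) acc).toList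
        = acc.toList ++ ps.flatMap (fun p => p ++ ['.']) := by
  induction ps with
  | nil => intro acc; simp
  | cons p rest ih =>
    intro acc
    rw [List.map_cons, List.foldl_cons, ih]
    simp [PySem.Str.toList_join, PySem.Chars.join, List.intercalate]

theorem str_ext {a b : String} (h : a.toList = b.toList) : a = b :=
  String.toList_inj.mp h

theorem version_num_eq (s : String) :
    (PySem.Str.split? s ".").getD [] = (mySplit [] s.toList).map String.ofList := by
  simp [PySem.Str.split?, PySem.Chars.split?, splitOn_eq_mySplit]

-- ===== VERDICT (by name: the statement is the Claim_ definition above) =====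
theorem update_version_spec : Claim_equal_update_version := by
  intro s _ hpre
  unfold Spec_update_version
  rcases rpartitionDot_spec s.toList with ⟨heq, hnd⟩ | ⟨h, t, heq, hcs, hnd⟩
  · -- no dot in the string
    have hsp : mySplit [] s.toList = [s.toList] := by
      simpa using mySplit_no_dot s.toList hnd []
    have hpre' : (PySem.Int.ofChars? s.toList).isSome = true := by
      unfold Pre_update_version at hpre
      rw [splitOn_eq_mySplit, hsp] at hpre
      simpa using hpre
    obtain ⟨n, hn⟩ := Option.isSome_iff_exists.mp hpre'
    apply str_ext
    unfold update_version update_version_alt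
    rw [version_num_eq, hsp, heq]
    simp only [List.map_cons, List.map_nil,
      PySem.List.pyGetD_neg_one ([String.ofList s.toList]) "" (by simp),
      List.getLast_singleton, PySem.Int.ofStr?, String.toList_ofList, hn,
      PySem.List.slice_to_neg_one]
    simp [PySem.Str.toList_join, PySem.Chars.join, List.intercalate, PySem.Int.toList_toStr]
  · -- last dot splits s.toList as h ++ '.' :: t
    have hsp : mySplit [] s.toList = mySplit [] h ++ [t] := by
      rw [hcs, mySplit_append_dot, mySplit_no_dot t hnd]; simp
    have hpre' : (PySem.Int.ofChars? t).isSome = true := by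
      unfold Pre_update_version at hpre
      rw [splitOn_eq_mySplit, hsp] at hpre
      simpa using hpre
    obtain ⟨n, hn⟩ := Option.isSome_iff_exists.mp hpre'
    apply str_ext
    unfold update_version update_version_alt
    rw [version_num_eq, hsp, heq]
    have hne : ((mySplit [] h ++ [t]).map String.ofList) ≠ [] := by simp
    have hlast : ((mySplit [] h ++ [t]).map String.ofList).getLast hne = String.ofList t := by
      rw [List.getLast_eq_getElem]; simp
    have hslice : PySem.List.slice ((mySplit [] h ++ [t]).map String.ofList) none (some (-1))
        = (mySplit [] h).map String.ofList := by
      rw [PySem.List.slice_to_neg_one, List.map_append]; simp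
    simp only [PySem.List.pyGetD_neg_one _ "" hne, hlast, hslice,
      PySem.Int.ofStr?, String.toList_ofList, hn]
    rw [PySem.Str.toList_join]
    simp only [List.map_cons, List.map_nil]
    rw [foldA_eq, mySplit_flatMap_dot]
    simp [PySem.Chars.join, List.intercalate, PySem.Int.toList_toStr]
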